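-- pv_equiv track=rewrite | github.com/OrAxelerator/trophee_nsi_ant | get_cellule.py | get_cellule
-- ===== SOURCE A (Python) =====
-- def get_cellule(world, tuple):
--     choices = {
--         "right" : (0,1),
--         "down" :(-1,0),
--         "left" :(0,-1),
--         "up": (1,0)
--         }
--
--     interdiction=[]
--     if tuple[0] == 0:
--         interdiction.append(choices["up"])
--     if tuple[0] == len(world[0]) - 1 :
--         interdiction.append(choices[ "down"])
--     if tuple[1] == 0 :
--         interdiction.append(choices["left"])
--     if tuple[1] == len(world[0]) - 1:
--         interdiction.append(choices["right"])
--
--     possibility = []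
--     for el in choices:
--         if choices[el] not in interdiction:
--             possibility.append(choices[el])
--     return possibility
-- ===== SOURCE B (Python) =====
-- def get_cellule(world, tuple):
--     edge = len(world[0]) - 1
--     possibility = []
--     if tuple[1] != edge:
--         possibility.append((0, 1))
--     if tuple[0] != edge:
--         possibility.append((-1, 0))
--     if tuple[1] != 0:
--         possibility.append((0, -1))
--     if tuple[0] != 0:
--         possibility.append((1, 0))
--     return possibility
-- ===== Notes on version B (the rewrite author's own statement) =====
-- stated objective: simpler
-- what changed: Replaced A's interdiction-list construction plus a membership-filtering loop over the direction dict with a single direct pass that appends each direction exactly when its boundary condition fails (keeping A's use of len(world[0])-1 for both axes).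
import Mathlib
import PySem

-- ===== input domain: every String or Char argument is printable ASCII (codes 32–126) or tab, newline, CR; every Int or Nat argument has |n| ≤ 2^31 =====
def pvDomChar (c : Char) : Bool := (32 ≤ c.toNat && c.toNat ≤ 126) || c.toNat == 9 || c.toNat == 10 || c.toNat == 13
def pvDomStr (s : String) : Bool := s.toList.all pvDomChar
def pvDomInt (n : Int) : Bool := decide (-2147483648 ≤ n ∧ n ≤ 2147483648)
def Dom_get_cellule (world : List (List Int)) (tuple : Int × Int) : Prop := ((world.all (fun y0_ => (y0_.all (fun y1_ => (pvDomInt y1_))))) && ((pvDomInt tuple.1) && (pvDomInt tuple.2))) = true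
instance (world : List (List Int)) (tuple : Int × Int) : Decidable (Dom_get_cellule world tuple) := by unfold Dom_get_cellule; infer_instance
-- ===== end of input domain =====

-- B drops A's interdiction list and dict-filter loop and builds the result in one direct pass (simpler); same return value on all inputs where A returns.

-- ===== PORT A =====
-- A's code: build the 'choices' dict, collect forbidden directions in 'interdiction',
-- then iterate over the dict filtering by membership in 'interdiction'.
def get_cellule (world : List (List Int)) (tuple : Int × Int) : List (Int × Int) :=
  match PySem.List.pyGet? world 0 with
  | none => []  -- world[0] raises IndexError; excluded by Pre_get_cellule
  | some row0 =>
    let choices : PySem.Dict String (Int × Int) :=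
      PySem.Dict.ofList [("right", (0, 1)), ("down", (-1, 0)), ("left", (0, -1)), ("up", (1, 0))]
    let interdiction : List (Int × Int) := []
    let interdiction := if tuple.1 = 0 then interdiction ++ [choices.getD "up" (0, 0)] else interdiction
    let interdiction := if tuple.1 = (row0.length : Int) - 1 then interdiction ++ [choices.getD "down" (0, 0)] else interdiction
    let interdiction := if tuple.2 = 0 then interdiction ++ [choices.getD "left" (0, 0)] else interdiction
    let interdiction := if tuple.2 = (row0.length : Int) - 1 then interdiction ++ [choices.getD "right" (0, 0)] else interdiction
    choices.keys.foldl (fun possibility el =>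
      if (choices.getD el (0, 0)) ∈ interdiction then possibility
      else possibility ++ [choices.getD el (0, 0)]) []

-- ===== PORT B =====
-- B's code: one pass, append each direction iff its boundary condition does not hold.
def get_cellule_alt (world : List (List Int)) (tuple : Int × Int) : List (Int × Int) :=
  match PySem.List.pyGet? world 0 with
  | none => []  -- world[0] raises IndexError; excluded by Pre_get_cellule
  | some row0 =>
    let edge : Int := (row0.length : Int) - 1
    let possibility : List (Int × Int) := []
    let possibility := if tuple.2 ≠ edge then possibility ++ [(0, 1)] else possibility
    let possibility := if tuple.1 ≠ edge then possibility ++ [(-1, 0)] else possibility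
    let possibility := if tuple.2 ≠ 0 then possibility ++ [(0, -1)] else possibility
    let possibility := if tuple.1 ≠ 0 then possibility ++ [(1, 0)] else possibility
    possibility

-- ===== PRECONDITION & SPEC =====
-- Pre_ excludes only world = [], where A raises IndexError on world[0].
def Pre_get_cellule (world : List (List Int)) (tuple : Int × Int) : Prop := world ≠ []
instance (world : List (List Int)) (tuple : Int × Int) : Decidable (Pre_get_cellule world tuple) := by unfold Pre_get_cellule; infer_instance
def pvWitness_get_cellule : List (List Int) × (Int × Int) := ([[1, 2], [3, 4]], (0, 1))

def Spec_get_cellule (world : List (List Int)) (tuple : Int × Int) (out : List (Int × Int)) : Prop := out = get_cellule_alt world tuple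
instance (world : List (List Int)) (tuple : Int × Int) (out : List (Int × Int)) : Decidable (Spec_get_cellule world tuple out) := by unfold Spec_get_cellule; infer_instance

-- ===== CLAIM (what is proved, stated in full; the proofs are below) =====
def Claim_equal_get_cellule : Prop := ∀ (world : List (List Int)) (tuple : Int × Int), Dom_get_cellule world tuple → Pre_get_cellule world tuple → Spec_get_cellule world tuple (get_cellule world tuple)

-- ===== LEMMAS AND PROOFS =====

-- helper evaluations of the literal choices dict (closed terms)
theorem pvChoicesKeys : (PySem.Dict.ofList [("right", ((0:Int), (1:Int))), ("down", (-1, 0)), ("left", (0, -1)), ("up", (1, 0))]).keys = ["right", "down", "left", "up"] := by decide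
theorem pvGetDright : (PySem.Dict.ofList [("right", ((0:Int), (1:Int))), ("down", (-1, 0)), ("left", (0, -1)), ("up", (1, 0))]).getD "right" (0, 0) = (0, 1) := by decide
theorem pvGetDdown : (PySem.Dict.ofList [("right", ((0:Int), (1:Int))), ("down", (-1, 0)), ("left", (0, -1)), ("up", (1, 0))]).getD "down" (0, 0) = (-1, 0) := by decide
theorem pvGetDleft : (PySem.Dict.ofList [("right", ((0:Int), (1:Int))), ("down", (-1, 0)), ("left", (0, -1)), ("up", (1, 0))]).getD "left" (0, 0) = (0, -1) := by decide
theorem pvGetDup : (PySem.Dict.ofList [("right", ((0:Int), (1:Int))), ("down", (-1, 0)), ("left", (0, -1)), ("up", (1, 0))]).getD "up" (0, 0) = (1, 0) := by decide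

-- ===== VERDICT (by name: the statement is the Claim_ definition above) =====
theorem get_cellule_spec : Claim_equal_get_cellule := by
  intro world tuple _ hpre
  unfold Spec_get_cellule get_cellule get_cellule_alt
  match world, hpre with
  | row0 :: rest, _ =>
    simp only [PySem.List.pyGet?_zero_cons]
    rcases eq_or_ne ((row0.length : Int) - 1) 0 with hL | hL
    · by_cases h1 : tuple.1 = 0 <;> by_cases h3 : tuple.2 = 0 <;>
        simp [h1, h3, hL, pvChoicesKeys, pvGetDright, pvGetDdown, pvGetDleft, pvGetDup,
          List.foldl]
    · by_cases h1 : tuple.1 = 0 <;> by_cases h2 : tuple.1 = (row0.length : Int) - 1 <;>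
        by_cases h3 : tuple.2 = 0 <;> by_cases h4 : tuple.2 = (row0.length : Int) - 1 <;>
        simp [h1, h2, h3, h4, hL, Ne.symm hL, pvChoicesKeys, pvGetDright, pvGetDdown,
          pvGetDleft, pvGetDup, List.foldl]
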